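-- pv_equiv track=rewrite | github.com/Dopiz/TrendMicro-Project | maxValidTime.py | max_valid_time
-- ===== SOURCE A (Python) =====
-- def max_valid_time(A, B, C, D):
--
--     l = [A, B, C, D]
--     s = [(2, 1,), (3, 9), (5,), (9,)]
--     h = []
--
--     try:
--         for i, v in enumerate(s):
--             if len(h) == 1:
--                 m = max(list(filter(lambda x: x <= v[1] if h[0] <= 1 else x <= v[0], l)))
--             else:
--                 m = max(list(filter(lambda x: x <= v[0], l)))
--
--             h.append(m)
--             l.remove(m)
--
--         return "%s%s:%s%s" % tuple(h)
--
--     except ValueError: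
--         try:
--             h = []
--             l = [A, B, C, D]
--             for i, v in enumerate(s):
--                 if len(h) < 2:
--                     m = max(list(filter(lambda x: x <= v[1], l)))
--                 else:
--                     m = max(list(filter(lambda x: x <= v[0], l)))
--                 h.append(m)
--                 l.remove(m)
--
--             return "%s%s:%s%s" % tuple(h)
--
--         except ValueError:
--             return "NOT POSSIBLE !"
-- ===== SOURCE B (Python) =====
-- def max_valid_time(A, B, C, D):
--     digits = [A, B, C, D]
--     best = None
--     for i in range(4):
--         for j in range(4):
--             if j == i:
--                 continue
--             for k in range(4):
--                 if k == i or k == j: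
--                     continue
--                 m = 6 - i - j - k
--                 w, x, y, z = digits[i], digits[j], digits[k], digits[m]
--                 if w <= 2 and (x <= 9 if w <= 1 else x <= 3) and y <= 5 and z <= 9:
--                     t = (w, x, y, z)
--                     if best is None or t > best:
--                         best = t
--     if best is None:
--         return "NOT POSSIBLE !"
--     return "%s%s:%s%s" % best
-- ===== Notes on version B (the rewrite author's own statement) =====
-- stated objective: idiomatic
-- what changed: A's greedy positional pick (max of filtered candidates per digit slot, with a try/except fallback re-run under a tighter first-digit bound) is replaced by a brute-force generate-and-filter: enumerate all 24 arrangements of the four digits, keep those satisfying the positional validity constraints, and return the lexicographically largest.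
import Mathlib
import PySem

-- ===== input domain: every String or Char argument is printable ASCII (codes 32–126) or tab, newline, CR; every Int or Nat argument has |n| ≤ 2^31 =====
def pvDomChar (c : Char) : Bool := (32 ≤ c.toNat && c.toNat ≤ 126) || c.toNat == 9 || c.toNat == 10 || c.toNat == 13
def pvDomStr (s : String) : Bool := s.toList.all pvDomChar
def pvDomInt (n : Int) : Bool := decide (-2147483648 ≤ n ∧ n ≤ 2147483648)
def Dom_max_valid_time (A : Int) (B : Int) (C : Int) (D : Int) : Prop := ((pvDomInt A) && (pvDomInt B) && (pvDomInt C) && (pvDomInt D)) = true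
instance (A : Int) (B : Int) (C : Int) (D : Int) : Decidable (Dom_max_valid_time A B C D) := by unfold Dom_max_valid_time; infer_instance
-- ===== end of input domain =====

-- B replaces A's greedy positional picking with try/except fallback by a brute-force
-- generate-and-filter over all 24 arrangements, keeping the lexicographically largest valid one.

-- ===== PORT A =====
-- "%s%s:%s%s" % tuple(h)
def mvtFmtA (a b c d : Int) : String :=
  PySem.Int.toStr a ++ PySem.Int.toStr b ++ ":" ++ PySem.Int.toStr c ++ PySem.Int.toStr d

-- s = [(2, 1,), (3, 9), (5,), (9,)]  (tuples of mixed arity, as lists)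
def mvtS : List (List Int) := [[2, 1], [3, 9], [5], [9]]

-- the first try-block loop; `none` = a ValueError was raised (empty max(); a failed remove
-- would also be a caught ValueError, though it cannot happen since m is drawn from l).
-- The tuple indexings v[0], v[1], h[0] are always in range where evaluated: pyGetD is exact here.
def mvtLoop1 : List (List Int) → List Int → List Int → Option (List Int)
  | [], h, _ => some h
  | v :: rest, h, l =>
    let m? : Option Int :=
      if h.length == 1 then
        PySem.List.max? (l.filter (fun x =>
          if PySem.List.pyGetD h 0 0 ≤ 1 then decide (x ≤ PySem.List.pyGetD v 1 0)
          else decide (x ≤ PySem.List.pyGetD v 0 0))) (fun x => x)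
      else
        PySem.List.max? (l.filter (fun x => decide (x ≤ PySem.List.pyGetD v 0 0))) (fun x => x)
    match m? with
    | none => none
    | some m =>
      match PySem.List.remove? l m with
      | none => none
      | some l' => mvtLoop1 rest (h ++ [m]) l'

-- the second (fallback) try-block loop
def mvtLoop2 : List (List Int) → List Int → List Int → Option (List Int)
  | [], h, _ => some h
  | v :: rest, h, l =>
    let m? : Option Int :=
      if h.length < 2 then
        PySem.List.max? (l.filter (fun x => decide (x ≤ PySem.List.pyGetD v 1 0))) (fun x => x)
      else
        PySem.List.max? (l.filter (fun x => decide (x ≤ PySem.List.pyGetD v 0 0))) (fun x => x)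
    match m? with
    | none => none
    | some m =>
      match PySem.List.remove? l m with
      | none => none
      | some l' => mvtLoop2 rest (h ++ [m]) l'

def max_valid_time (A : Int) (B : Int) (C : Int) (D : Int) : String :=
  match mvtLoop1 mvtS [] [A, B, C, D] with
  | some h => mvtFmtA (PySem.List.pyGetD h 0 0) (PySem.List.pyGetD h 1 0) (PySem.List.pyGetD h 2 0) (PySem.List.pyGetD h 3 0)
  | none =>
    match mvtLoop2 mvtS [] [A, B, C, D] with
    | some h => mvtFmtA (PySem.List.pyGetD h 0 0) (PySem.List.pyGetD h 1 0) (PySem.List.pyGetD h 2 0) (PySem.List.pyGetD h 3 0)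
    | none => "NOT POSSIBLE !"

-- ===== PORT B =====
def mvtbValid (w x y z : Int) : Bool :=
  decide (w ≤ 2) && (if w ≤ 1 then decide (x ≤ 9) else decide (x ≤ 3)) && decide (y ≤ 5) && decide (z ≤ 9)

-- Python tuple `>` (lexicographic)
def mvtbGt (t b : Int × Int × Int × Int) : Bool :=
  decide (b.1 < t.1) || (t.1 == b.1 && (decide (b.2.1 < t.2.1) || (t.2.1 == b.2.1 &&
    (decide (b.2.2.1 < t.2.2.1) || (t.2.2.1 == b.2.2.1 && decide (b.2.2.2 < t.2.2.2))))))

-- loop body at indices (i, j, k); digits[i], digits[j], digits[k], digits[m] are in range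
def mvtbStep (digits : List Int) (best : Option (Int × Int × Int × Int)) (i j k : Nat) :
    Option (Int × Int × Int × Int) :=
  let m := 6 - i - j - k
  let w := digits.getD i 0
  let x := digits.getD j 0
  let y := digits.getD k 0
  let z := digits.getD m 0
  if mvtbValid w x y z then
    match best with
    | none => some (w, x, y, z)
    | some b => if mvtbGt (w, x, y, z) b then some (w, x, y, z) else some b
  else best

def mvtbLoop (digits : List Int) : Option (Int × Int × Int × Int) :=
  (List.range 4).foldl (fun best i =>
    (List.range 4).foldl (fun best j =>
      if j == i then best else
      (List.range 4).foldl (fun best k =>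
        if k == i || k == j then best else mvtbStep digits best i j k) best) best) none

def max_valid_time_alt (A : Int) (B : Int) (C : Int) (D : Int) : String :=
  match mvtbLoop [A, B, C, D] with
  | none => "NOT POSSIBLE !"
  | some (w, x, y, z) =>
    PySem.Int.toStr w ++ PySem.Int.toStr x ++ ":" ++ PySem.Int.toStr y ++ PySem.Int.toStr z

-- ===== PRECONDITION & SPEC =====
def Spec_max_valid_time (A : Int) (B : Int) (C : Int) (D : Int) (out : String) : Prop := out = max_valid_time_alt A B C D
instance (A : Int) (B : Int) (C : Int) (D : Int) (out : String) : Decidable (Spec_max_valid_time A B C D out) := by unfold Spec_max_valid_time; infer_instance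

-- ===== CLAIM (what is proved, stated in full; the proofs are below) =====
def Claim_equal_max_valid_time : Prop := ∀ (A : Int) (B : Int) (C : Int) (D : Int), Dom_max_valid_time A B C D → Spec_max_valid_time A B C D (max_valid_time A B C D)

-- ===== LEMMAS AND PROOFS =====

-- ---- the lexicographic order behind Python's tuple comparison ----
theorem mvtbGt_false_iff (t u : Int × Int × Int × Int) :
    mvtbGt t u = false ↔
      (t.1 < u.1 ∨ (t.1 = u.1 ∧ (t.2.1 < u.2.1 ∨ (t.2.1 = u.2.1 ∧
        (t.2.2.1 < u.2.2.1 ∨ (t.2.2.1 = u.2.2.1 ∧ t.2.2.2 ≤ u.2.2.2)))))) := by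
  obtain ⟨a, b, c, d⟩ := t; obtain ⟨p, q, r, s⟩ := u
  simp only [mvtbGt, Bool.or_eq_false_iff, Bool.and_eq_false_iff, decide_eq_false_iff_not,
    beq_eq_false_iff_ne, not_lt]
  omega

theorem mvtbGt_irrefl (t : Int × Int × Int × Int) : mvtbGt t t = false := by
  obtain ⟨a, b, c, d⟩ := t
  rw [mvtbGt_false_iff]
  dsimp only
  omega

theorem mvtbGt_asymm {t u : Int × Int × Int × Int} (h : mvtbGt t u = true) :
    mvtbGt u t = false := by
  obtain ⟨a, b, c, d⟩ := t; obtain ⟨p, q, r, s⟩ := u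
  rw [mvtbGt_false_iff]
  simp only [mvtbGt, Bool.or_eq_true, Bool.and_eq_true, decide_eq_true_eq, beq_iff_eq] at h
  dsimp only at h ⊢
  omega

theorem mvtbGt_antisymm {t u : Int × Int × Int × Int}
    (h1 : mvtbGt t u = false) (h2 : mvtbGt u t = false) : t = u := by
  obtain ⟨a, b, c, d⟩ := t; obtain ⟨p, q, r, s⟩ := u
  rw [mvtbGt_false_iff] at h1 h2
  simp only [Prod.mk.injEq]
  dsimp only at h1 h2
  omega

theorem mvtbGt_false_trans {t u v : Int × Int × Int × Int}
    (h1 : mvtbGt t u = false) (h2 : mvtbGt u v = false) : mvtbGt t v = false := by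
  obtain ⟨a, b, c, d⟩ := t; obtain ⟨p, q, r, s⟩ := u; obtain ⟨e, f, g, i⟩ := v
  rw [mvtbGt_false_iff] at h1 h2 ⊢
  dsimp only at h1 h2 ⊢
  omega

theorem mvtbValid_iff {w x y z : Int} :
    mvtbValid w x y z = true ↔
      w ≤ 2 ∧ ((w ≤ 1 ∧ x ≤ 9) ∨ (¬ w ≤ 1 ∧ x ≤ 3)) ∧ y ≤ 5 ∧ z ≤ 9 := by
  by_cases h : w ≤ 1 <;> simp [mvtbValid, h] <;> tauto

-- ---- facts about max(filter(...)) ----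
theorem maxf_some {l : List Int} {p : Int → Bool} {m : Int}
    (h : PySem.List.max? (l.filter p) (fun x => x) = some m) :
    m ∈ l ∧ p m = true ∧ ∀ x ∈ l, p x = true → x ≤ m := by
  have hm := PySem.List.max?_mem h
  have hmax := PySem.List.max?_isMax h
  refine ⟨(List.mem_filter.mp hm).1, (List.mem_filter.mp hm).2, fun x hx hpx => ?_⟩
  exact hmax x (List.mem_filter.mpr ⟨hx, hpx⟩)

theorem maxf_mem {l : List Int} {p : Int → Bool} {m : Int}
    (h : PySem.List.max? (l.filter p) (fun x => x) = some m) : m ∈ l :=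
  (List.mem_filter.mp (PySem.List.max?_mem h)).1

theorem maxf_none {l : List Int} {p : Int → Bool}
    (h : PySem.List.max? (l.filter p) (fun x => x) = none) :
    ∀ x ∈ l, p x = false := by
  rw [PySem.List.max?_eq_none_iff] at h
  intro x hx
  by_contra hp
  have : x ∈ l.filter p := List.mem_filter.mpr ⟨hx, by simpa using hp⟩
  simp [h] at this

-- ---- a generic fixed-bounds greedy: proof-side model of the tails of A's loops ----
def gre : List Int → List Int → Option (List Int)
  | [], _ => some []
  | β :: bs, l =>
    match PySem.List.max? (l.filter (fun x => decide (x ≤ β))) (fun x => x) with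
    | none => none
    | some m => (gre bs (l.erase m)).map (fun t => m :: t)

-- a selection: a list of picks, pointwise below the bounds
def SelOk (ts bs : List Int) : Prop := List.Forall₂ (· ≤ ·) ts bs

-- list-lexicographic ≤
def lexLeL : List Int → List Int → Prop
  | [], [] => True
  | x :: xs, y :: ys => x < y ∨ (x = y ∧ lexLeL xs ys)
  | _, _ => False

theorem selok_exchange {u v bs : List Int} {m t1 : Int}
    (h : SelOk (u ++ m :: v) bs) (hle : t1 ≤ m) : SelOk (u ++ t1 :: v) bs := by
  induction u generalizing bs with
  | nil => cases h with | cons hb ht => exact List.Forall₂.cons (le_trans hle hb) ht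
  | cons a u ih => cases h with | cons hb ht => exact List.Forall₂.cons hb (ih ht)

-- exchange: a selection whose first pick t1 is ≤ m (m in the pool) yields a selection of the
-- remaining bounds from the pool minus m
theorem exch {l bs : List Int} {t1 : Int} {rest : List Int} {m : Int}
    (hperm : (t1 :: rest).Perm l) (hok : SelOk rest bs) (hm : m ∈ l) (hle : t1 ≤ m) :
    ∃ rest', rest'.Perm (l.erase m) ∧ SelOk rest' bs := by
  by_cases heq : t1 = m
  · subst heq
    exact ⟨rest, (hperm.trans (List.perm_cons_erase hm)).cons_inv, hok⟩
  · have hmrest : m ∈ rest := by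
      have h1 : m ∈ t1 :: rest := hperm.mem_iff.mpr hm
      rcases List.mem_cons.mp h1 with h | h
      · exact absurd h.symm heq
      · exact h
    obtain ⟨u, v, rfl⟩ := List.mem_iff_append.mp hmrest
    refine ⟨u ++ t1 :: v, ?_, selok_exchange hok hle⟩
    have h2 : (t1 :: (u ++ m :: v)).Perm (t1 :: m :: (u ++ v)) :=
      List.Perm.cons t1 List.perm_middle
    have h3 : (t1 :: m :: (u ++ v)).Perm l := h2.symm.trans hperm
    have h4 : ((t1 :: m :: (u ++ v)).erase m).Perm (l.erase m) := h3.erase m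
    have h5 : (t1 :: m :: (u ++ v)).erase m = t1 :: (u ++ v) := by
      rw [List.erase_cons_tail (by simpa using heq), List.erase_cons_head]
    rw [h5] at h4
    exact List.perm_middle.trans h4

theorem gre_none {bs : List Int} : ∀ {l : List Int}, gre bs l = none →
    ∀ ts, ts.Perm l → SelOk ts bs → False := by
  induction bs with
  | nil => intro l h; simp [gre] at h
  | cons β bs ih =>
    intro l h ts hperm hok
    cases hok with
    | cons hb ht =>
      rename_i t1 ts'
      have ht1l : t1 ∈ l := hperm.mem_iff.mp (List.mem_cons_self ..)
      rw [gre] at h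
      rcases hmax : PySem.List.max? (l.filter (fun x => decide (x ≤ β))) (fun x => x) with _ | m
      · have := maxf_none hmax t1 ht1l
        simp at this
        omega
      · simp only [hmax, Option.map_eq_none_iff] at h
        obtain ⟨hm, hmβ, _⟩ := maxf_some hmax
        have hle : t1 ≤ m := (maxf_some hmax).2.2 t1 ht1l (by simpa using hb)
        obtain ⟨rest', hp', hok'⟩ := exch hperm ht hm hle
        exact ih h rest' hp' hok'

theorem gre_some {bs : List Int} : ∀ {l hs : List Int}, gre bs l = some hs →
    l.length = bs.length → hs.Perm l ∧ SelOk hs bs := by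
  induction bs with
  | nil =>
    intro l hs h hlen
    simp [gre] at h
    subst h
    simp only [List.length_nil] at hlen
    rw [List.length_eq_zero_iff] at hlen
    subst hlen
    exact ⟨List.Perm.refl _, List.Forall₂.nil⟩
  | cons β bs ih =>
    intro l hs h hlen
    rw [gre] at h
    rcases hmax : PySem.List.max? (l.filter (fun x => decide (x ≤ β))) (fun x => x) with _ | m
    · simp only [hmax] at h; simp at h
    · rcases hrec : gre bs (l.erase m) with _ | t
      · simp only [hmax, hrec] at h; simp at h
      · simp only [hmax, hrec, Option.map_some, Option.some.injEq] at h
        subst h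
        obtain ⟨hm, hmβ, _⟩ := maxf_some hmax
        have hlen' : (l.erase m).length = bs.length := by
          rw [List.length_erase_of_mem hm]; simp at hlen ⊢; omega
        obtain ⟨hp, hok⟩ := ih hrec hlen'
        refine ⟨?_, List.Forall₂.cons (by simpa using hmβ) hok⟩
        exact (List.Perm.cons m hp).trans (List.perm_cons_erase hm).symm

theorem gre_dom {bs : List Int} : ∀ {l hs : List Int}, gre bs l = some hs →
    ∀ ts, ts.Perm l → SelOk ts bs → lexLeL ts hs := by
  induction bs with
  | nil =>
    intro l hs h ts hperm hok
    simp [gre] at h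
    subst h
    cases hok
    trivial
  | cons β bs ih =>
    intro l hs h ts hperm hok
    cases hok with
    | cons hb ht =>
      rename_i t1 ts'
      rw [gre] at h
      rcases hmax : PySem.List.max? (l.filter (fun x => decide (x ≤ β))) (fun x => x) with _ | m
      · simp only [hmax] at h; simp at h
      · rcases hrec : gre bs (l.erase m) with _ | t
        · simp only [hmax, hrec] at h; simp at h
        · simp only [hmax, hrec, Option.map_some, Option.some.injEq] at h
          subst h
          have ht1l : t1 ∈ l := hperm.mem_iff.mp (List.mem_cons_self ..)
          have hle : t1 ≤ m := (maxf_some hmax).2.2 t1 ht1l (by simpa using hb)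
          rcases eq_or_lt_of_le hle with heq | hlt
          · subst heq
            have hts' : ts'.Perm (l.erase t1) := (hperm.trans (List.perm_cons_erase ht1l)).cons_inv
            exact Or.inr ⟨rfl, ih hrec ts' hts' ht⟩
          · exact Or.inl hlt

-- ---- bridges: the tails of A's loops compute the fixed-bounds greedy ----
theorem bridge1_9 {h l : List Int} (hh : 2 ≤ h.length) :
    mvtLoop1 [[9]] h l = (gre [9] l).map (fun t => h ++ t) := by
  have hne : (h.length == 1) = false := by simp; omega
  rw [mvtLoop1, gre]
  simp only [hne, Bool.false_eq_true, if_false, PySem.List.pyGetD_zero_cons]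
  rcases hmax : PySem.List.max? (l.filter (fun x => decide (x ≤ (9:Int)))) (fun x => x) with _ | m
  · rfl
  · dsimp only
    rw [PySem.List.remove?_eq_some_erase l m (maxf_mem hmax)]
    simp [gre, mvtLoop1]

theorem bridge1_59 {h l : List Int} (hh : 2 ≤ h.length) :
    mvtLoop1 [[5], [9]] h l = (gre [5, 9] l).map (fun t => h ++ t) := by
  have hne : (h.length == 1) = false := by simp; omega
  rw [mvtLoop1, gre]
  simp only [hne, Bool.false_eq_true, if_false, PySem.List.pyGetD_zero_cons]
  rcases hmax : PySem.List.max? (l.filter (fun x => decide (x ≤ (5:Int)))) (fun x => x) with _ | m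
  · rfl
  · dsimp only
    rw [PySem.List.remove?_eq_some_erase l m (maxf_mem hmax)]
    dsimp only
    rw [bridge1_9 (by simp; omega)]
    rcases gre [9] (l.erase m) with _ | t <;> simp

theorem bridge1_tail {m1 : Int} {l : List Int} :
    mvtLoop1 [[3, 9], [5], [9]] [m1] l =
      (gre [if m1 ≤ 1 then 9 else 3, 5, 9] l).map (fun t => m1 :: t) := by
  have e1 : PySem.List.pyGetD ([m1] : List Int) 0 0 = m1 := rfl
  have e2 : PySem.List.pyGetD ([3, 9] : List Int) 1 0 = 9 := rfl
  have e3 : PySem.List.pyGetD ([3, 9] : List Int) 0 0 = 3 := rfl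
  rw [mvtLoop1, gre]
  rw [if_pos (show (([m1] : List Int).length == 1) = true from rfl)]
  simp only [e1, e2, e3]
  have hp : (fun x => if m1 ≤ 1 then decide (x ≤ (9:Int)) else decide (x ≤ (3:Int)))
      = (fun x => decide (x ≤ if m1 ≤ 1 then (9:Int) else 3)) := by
    funext x
    by_cases hm : m1 ≤ 1 <;> simp [hm]
  rw [hp]
  rcases hmax : PySem.List.max? (l.filter (fun x => decide (x ≤ if m1 ≤ 1 then (9:Int) else 3))) (fun x => x) with _ | m
  · rfl
  · dsimp only
    rw [PySem.List.remove?_eq_some_erase l m (maxf_mem hmax)]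
    dsimp only
    rw [show ([m1] ++ [m] : List Int) = [m1, m] from rfl, bridge1_59 (by simp)]
    rcases gre [5, 9] (l.erase m) with _ | t <;> simp

theorem bridge2_9 {h l : List Int} (hh : 2 ≤ h.length) :
    mvtLoop2 [[9]] h l = (gre [9] l).map (fun t => h ++ t) := by
  rw [mvtLoop2, gre]
  rw [if_neg (by omega : ¬ h.length < 2)]
  simp only [PySem.List.pyGetD_zero_cons]
  rcases hmax : PySem.List.max? (l.filter (fun x => decide (x ≤ (9:Int)))) (fun x => x) with _ | m
  · rfl
  · dsimp only
    rw [PySem.List.remove?_eq_some_erase l m (maxf_mem hmax)]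
    simp [gre, mvtLoop2]

theorem bridge2_59 {h l : List Int} (hh : 2 ≤ h.length) :
    mvtLoop2 [[5], [9]] h l = (gre [5, 9] l).map (fun t => h ++ t) := by
  rw [mvtLoop2, gre]
  rw [if_neg (by omega : ¬ h.length < 2)]
  simp only [PySem.List.pyGetD_zero_cons]
  rcases hmax : PySem.List.max? (l.filter (fun x => decide (x ≤ (5:Int)))) (fun x => x) with _ | m
  · rfl
  · dsimp only
    rw [PySem.List.remove?_eq_some_erase l m (maxf_mem hmax)]
    dsimp only
    rw [bridge2_9 (by simp; omega)]
    rcases gre [9] (l.erase m) with _ | t <;> simp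

theorem bridge2_tail {n1 : Int} {l : List Int} :
    mvtLoop2 [[3, 9], [5], [9]] [n1] l = (gre [9, 5, 9] l).map (fun t => n1 :: t) := by
  have e2 : PySem.List.pyGetD ([3, 9] : List Int) 1 0 = 9 := rfl
  rw [mvtLoop2, gre]
  rw [if_pos (by simp : ([n1] : List Int).length < 2)]
  simp only [e2]
  rcases hmax : PySem.List.max? (l.filter (fun x => decide (x ≤ (9:Int)))) (fun x => x) with _ | m
  · rfl
  · dsimp only
    rw [PySem.List.remove?_eq_some_erase l m (maxf_mem hmax)]
    dsimp only
    rw [show ([n1] ++ [m] : List Int) = [n1, m] from rfl, bridge2_59 (by simp)]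
    rcases gre [5, 9] (l.erase m) with _ | t <;> simp

theorem top1_none {l : List Int}
    (hmax : PySem.List.max? (l.filter (fun x => decide (x ≤ (2:Int)))) (fun x => x) = none) :
    mvtLoop1 mvtS [] l = none := by
  rw [mvtS, mvtLoop1]
  rw [if_neg (by decide : ¬ ((([] : List Int).length == 1) = true))]
  simp only [PySem.List.pyGetD_zero_cons, hmax]

theorem top1_some {l : List Int} {m1 : Int}
    (hmax : PySem.List.max? (l.filter (fun x => decide (x ≤ (2:Int)))) (fun x => x) = some m1) :
    mvtLoop1 mvtS [] l =
      (gre [if m1 ≤ 1 then 9 else 3, 5, 9] (l.erase m1)).map (fun t => m1 :: t) := by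
  rw [mvtS, mvtLoop1]
  rw [if_neg (by decide : ¬ ((([] : List Int).length == 1) = true))]
  simp only [PySem.List.pyGetD_zero_cons, hmax]
  rw [PySem.List.remove?_eq_some_erase l m1 (maxf_mem hmax)]
  dsimp only
  rw [show ([] ++ [m1] : List Int) = [m1] from rfl, bridge1_tail]

theorem top2_none {l : List Int}
    (hmax : PySem.List.max? (l.filter (fun x => decide (x ≤ (1:Int)))) (fun x => x) = none) :
    mvtLoop2 mvtS [] l = none := by
  rw [mvtS, mvtLoop2]
  rw [if_pos (by decide : (([] : List Int).length < 2))]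
  have e : PySem.List.pyGetD ([2, 1] : List Int) 1 0 = 1 := rfl
  simp only [e, hmax]

theorem top2_some {l : List Int} {n1 : Int}
    (hmax : PySem.List.max? (l.filter (fun x => decide (x ≤ (1:Int)))) (fun x => x) = some n1) :
    mvtLoop2 mvtS [] l = (gre [9, 5, 9] (l.erase n1)).map (fun t => n1 :: t) := by
  rw [mvtS, mvtLoop2]
  rw [if_pos (by decide : (([] : List Int).length < 2))]
  have e : PySem.List.pyGetD ([2, 1] : List Int) 1 0 = 1 := rfl
  simp only [e, hmax]
  rw [PySem.List.remove?_eq_some_erase l n1 (maxf_mem hmax)]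
  dsimp only
  rw [show ([] ++ [n1] : List Int) = [n1] from rfl, bridge2_tail]

-- ---- B's fold over the 24 arrangements ----
def bstep (best : Option (Int × Int × Int × Int)) (t : Int × Int × Int × Int) :
    Option (Int × Int × Int × Int) :=
  if mvtbValid t.1 t.2.1 t.2.2.1 t.2.2.2 then
    match best with
    | none => some t
    | some b => if mvtbGt t b then some t else some b
  else best

def mvtLB (a b c d : Int) : List (Int × Int × Int × Int) :=
  [(a,b,c,d),(a,b,d,c),(a,c,b,d),(a,c,d,b),(a,d,b,c),(a,d,c,b),
   (b,a,c,d),(b,a,d,c),(b,c,a,d),(b,c,d,a),(b,d,a,c),(b,d,c,a),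
   (c,a,b,d),(c,a,d,b),(c,b,a,d),(c,b,d,a),(c,d,a,b),(c,d,b,a),
   (d,a,b,c),(d,a,c,b),(d,b,a,c),(d,b,c,a),(d,c,a,b),(d,c,b,a)]

theorem mvtbLoop_eq (a b c d : Int) :
    mvtbLoop [a, b, c, d] = (mvtLB a b c d).foldl bstep none := rfl

theorem bstep_eq_none_iff {acc : Option (Int × Int × Int × Int)} {t : Int × Int × Int × Int} :
    bstep acc t = none ↔ acc = none ∧ ¬ mvtbValid t.1 t.2.1 t.2.2.1 t.2.2.2 = true := by
  cases acc with
  | none =>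
    unfold bstep
    by_cases hv : mvtbValid t.1 t.2.1 t.2.2.1 t.2.2.2 = true <;> simp [hv]
  | some b =>
    unfold bstep
    by_cases hv : mvtbValid t.1 t.2.1 t.2.2.1 t.2.2.2 = true <;> simp [hv]
    by_cases hgt : mvtbGt t b = true <;> simp [hgt]

theorem foldl_bstep_none {ts : List (Int × Int × Int × Int)} :
    ∀ {acc}, ts.foldl bstep acc = none ↔
      acc = none ∧ ∀ t ∈ ts, ¬ mvtbValid t.1 t.2.1 t.2.2.1 t.2.2.2 = true := by
  induction ts with
  | nil => simp
  | cons t ts ih =>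
    intro acc
    rw [List.foldl_cons, ih, bstep_eq_none_iff]
    constructor
    · rintro ⟨⟨h1, h2⟩, h3⟩
      exact ⟨h1, by simpa using And.intro h2 h3⟩
    · rintro ⟨h1, h2⟩
      simp only [List.mem_cons] at h2
      exact ⟨⟨h1, h2 t (Or.inl rfl)⟩, fun u hu => h2 u (Or.inr hu)⟩

theorem foldl_bstep_some {ts : List (Int × Int × Int × Int)} :
    ∀ {acc r}, ts.foldl bstep acc = some r →
      (acc = some r ∨ (mvtbValid r.1 r.2.1 r.2.2.1 r.2.2.2 = true ∧ r ∈ ts)) ∧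
      (∀ t ∈ ts, mvtbValid t.1 t.2.1 t.2.2.1 t.2.2.2 = true → mvtbGt t r = false) ∧
      (∀ b, acc = some b → mvtbGt b r = false) := by
  induction ts with
  | nil =>
    intro acc r h
    simp only [List.foldl_nil] at h
    refine ⟨Or.inl h, by simp, fun b hb => ?_⟩
    rw [hb] at h
    cases h
    exact mvtbGt_irrefl _
  | cons t ts ih =>
    intro acc r h
    rw [List.foldl_cons] at h
    obtain ⟨h1, h2, h3⟩ := ih h
    have htdom : mvtbValid t.1 t.2.1 t.2.2.1 t.2.2.2 = true → mvtbGt t r = false := by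
      intro hv
      have hex : ∃ c, bstep acc t = some c ∧ mvtbGt t c = false := by
        unfold bstep
        rw [if_pos hv]
        cases acc with
        | none => exact ⟨t, rfl, mvtbGt_irrefl t⟩
        | some b =>
          by_cases hgt : mvtbGt t b = true
          · exact ⟨t, by simp [hgt], mvtbGt_irrefl t⟩
          · exact ⟨b, by simp [hgt], by simpa using hgt⟩
      obtain ⟨c, hc, htc⟩ := hex
      exact mvtbGt_false_trans htc (h3 c hc)
    refine ⟨?_, ?_, ?_⟩
    · rcases h1 with h1 | h1
      · unfold bstep at h1
        by_cases hv : mvtbValid t.1 t.2.1 t.2.2.1 t.2.2.2 = true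
        · rw [if_pos hv] at h1
          cases acc with
          | none =>
            cases h1
            exact Or.inr ⟨hv, List.mem_cons_self ..⟩
          | some b =>
            dsimp only at h1
            by_cases hgt : mvtbGt t b = true
            · simp only [hgt, if_true] at h1
              cases h1
              exact Or.inr ⟨hv, List.mem_cons_self ..⟩
            · rw [if_neg hgt] at h1
              exact Or.inl h1
        · rw [if_neg hv] at h1
          exact Or.inl h1
      · exact Or.inr ⟨h1.1, List.mem_cons_of_mem _ h1.2⟩
    · intro u hu hv
      rcases List.mem_cons.mp hu with rfl | hu'
      · exact htdom hv
      · exact h2 u hu' hv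
    · intro b hb
      subst hb
      have hex : ∃ c, bstep (some b) t = some c ∧ mvtbGt b c = false := by
        unfold bstep
        by_cases hv : mvtbValid t.1 t.2.1 t.2.2.1 t.2.2.2 = true
        · rw [if_pos hv]
          by_cases hgt : mvtbGt t b = true
          · exact ⟨t, by simp [hgt], mvtbGt_asymm hgt⟩
          · exact ⟨b, by simp [hgt], mvtbGt_irrefl b⟩
        · rw [if_neg hv]
          exact ⟨b, rfl, mvtbGt_irrefl b⟩
      obtain ⟨c, hc, hbc⟩ := hex
      exact mvtbGt_false_trans hbc (h3 c hc)

-- ---- the 24 arrangements are exactly the permutations of [a, b, c, d] ----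
theorem pswap01 (p q r s : Int) : ([q, p, r, s] : List Int).Perm [p, q, r, s] :=
  List.Perm.swap p q [r, s]
theorem pswap12 (p q r s : Int) : ([p, r, q, s] : List Int).Perm [p, q, r, s] :=
  List.Perm.cons p (List.Perm.swap q r [s])
theorem pswap23 (p q r s : Int) : ([p, q, s, r] : List Int).Perm [p, q, r, s] :=
  List.Perm.cons p (List.Perm.cons q (List.Perm.swap r s []))
theorem mem_LB_perm {a b c d w x y z : Int} (h : (w,x,y,z) ∈ mvtLB a b c d) :
    ([w,x,y,z] : List Int).Perm [a,b,c,d] := by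
  simp only [mvtLB, List.mem_cons, List.not_mem_nil, or_false, Prod.mk.injEq] at h
  rcases h with ⟨rfl,rfl,rfl,rfl⟩|⟨rfl,rfl,rfl,rfl⟩|⟨rfl,rfl,rfl,rfl⟩|⟨rfl,rfl,rfl,rfl⟩|⟨rfl,rfl,rfl,rfl⟩|⟨rfl,rfl,rfl,rfl⟩|⟨rfl,rfl,rfl,rfl⟩|⟨rfl,rfl,rfl,rfl⟩|⟨rfl,rfl,rfl,rfl⟩|⟨rfl,rfl,rfl,rfl⟩|⟨rfl,rfl,rfl,rfl⟩|⟨rfl,rfl,rfl,rfl⟩|⟨rfl,rfl,rfl,rfl⟩|⟨rfl,rfl,rfl,rfl⟩|⟨rfl,rfl,rfl,rfl⟩|⟨rfl,rfl,rfl,rfl⟩|⟨rfl,rfl,rfl,rfl⟩|⟨rfl,rfl,rfl,rfl⟩|⟨rfl,rfl,rfl,rfl⟩|⟨rfl,rfl,rfl,rfl⟩|⟨rfl,rfl,rfl,rfl⟩|⟨rfl,rfl,rfl,rfl⟩|⟨rfl,rfl,rfl,rfl⟩|⟨rfl,rfl,rfl,rfl⟩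
  · exact List.Perm.refl _
  · exact (pswap23 _ _ _ _)
  · exact (pswap12 _ _ _ _)
  · exact ((pswap23 _ _ _ _).trans (pswap12 _ _ _ _))
  · exact ((pswap12 _ _ _ _).trans (pswap23 _ _ _ _))
  · exact (((pswap12 _ _ _ _).trans (pswap23 _ _ _ _)).trans (pswap12 _ _ _ _))
  · exact (pswap01 _ _ _ _)
  · exact ((pswap01 _ _ _ _).trans (pswap23 _ _ _ _))
  · exact ((pswap12 _ _ _ _).trans (pswap01 _ _ _ _))
  · exact (((pswap23 _ _ _ _).trans (pswap12 _ _ _ _)).trans (pswap01 _ _ _ _))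
  · exact (((pswap12 _ _ _ _).trans (pswap01 _ _ _ _)).trans (pswap23 _ _ _ _))
  · exact ((((pswap12 _ _ _ _).trans (pswap23 _ _ _ _)).trans (pswap12 _ _ _ _)).trans (pswap01 _ _ _ _))
  · exact ((pswap01 _ _ _ _).trans (pswap12 _ _ _ _))
  · exact (((pswap01 _ _ _ _).trans (pswap23 _ _ _ _)).trans (pswap12 _ _ _ _))
  · exact (((pswap01 _ _ _ _).trans (pswap12 _ _ _ _)).trans (pswap01 _ _ _ _))
  · exact ((((pswap01 _ _ _ _).trans (pswap23 _ _ _ _)).trans (pswap12 _ _ _ _)).trans (pswap01 _ _ _ _))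
  · exact ((((pswap12 _ _ _ _).trans (pswap01 _ _ _ _)).trans (pswap23 _ _ _ _)).trans (pswap12 _ _ _ _))
  · exact (((((pswap12 _ _ _ _).trans (pswap01 _ _ _ _)).trans (pswap23 _ _ _ _)).trans (pswap12 _ _ _ _)).trans (pswap01 _ _ _ _))
  · exact (((pswap01 _ _ _ _).trans (pswap12 _ _ _ _)).trans (pswap23 _ _ _ _))
  · exact ((((pswap01 _ _ _ _).trans (pswap12 _ _ _ _)).trans (pswap23 _ _ _ _)).trans (pswap12 _ _ _ _))
  · exact ((((pswap01 _ _ _ _).trans (pswap12 _ _ _ _)).trans (pswap01 _ _ _ _)).trans (pswap23 _ _ _ _))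
  · exact (((((pswap01 _ _ _ _).trans (pswap12 _ _ _ _)).trans (pswap23 _ _ _ _)).trans (pswap12 _ _ _ _)).trans (pswap01 _ _ _ _))
  · exact (((((pswap01 _ _ _ _).trans (pswap12 _ _ _ _)).trans (pswap01 _ _ _ _)).trans (pswap23 _ _ _ _)).trans (pswap12 _ _ _ _))
  · exact ((((((pswap01 _ _ _ _).trans (pswap12 _ _ _ _)).trans (pswap01 _ _ _ _)).trans (pswap23 _ _ _ _)).trans (pswap12 _ _ _ _)).trans (pswap01 _ _ _ _))

theorem perm2_cases {y z p q : Int} (h : ([y, z] : List Int).Perm [p, q]) :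
    (y = p ∧ z = q) ∨ (y = q ∧ z = p) := by
  have hy : y ∈ [p, q] := h.mem_iff.mp (List.mem_cons_self ..)
  rcases List.mem_cons.mp hy with rfl | hy'
  · have h2 : ([z] : List Int).Perm [q] := h.cons_inv
    exact Or.inl ⟨rfl, by simpa using List.perm_singleton.mp h2⟩
  · have hyq : y = q := by simpa using hy'
    subst hyq
    have h2 : ([z] : List Int).Perm [p] :=
      (h.trans (List.Perm.swap _ _ _)).cons_inv
    exact Or.inr ⟨rfl, by simpa using List.perm_singleton.mp h2⟩

theorem perm3_cases {x y z p q r : Int} (h : ([x, y, z] : List Int).Perm [p, q, r]) :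
    (x = p ∧ ([y, z] : List Int).Perm [q, r]) ∨
    (x = q ∧ ([y, z] : List Int).Perm [p, r]) ∨
    (x = r ∧ ([y, z] : List Int).Perm [p, q]) := by
  have hx : x ∈ [p, q, r] := h.mem_iff.mp (List.mem_cons_self ..)
  rcases List.mem_cons.mp hx with rfl | hx'
  · exact Or.inl ⟨rfl, h.cons_inv⟩
  rcases List.mem_cons.mp hx' with rfl | hx''
  · exact Or.inr (Or.inl ⟨rfl, (h.trans (List.Perm.swap _ _ _)).cons_inv⟩)
  · have hxr : x = r := by simpa using hx''
    subst hxr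
    have hc : ([p, q, x] : List Int).Perm [x, p, q] :=
      ((List.Perm.swap _ _ _).trans (List.Perm.cons p (List.Perm.swap _ _ _))).symm
    exact Or.inr (Or.inr ⟨rfl, (h.trans hc).cons_inv⟩)

theorem perm4_cases {w x y z a b c d : Int} (h : ([w, x, y, z] : List Int).Perm [a, b, c, d]) :
    (w = a ∧ ([x, y, z] : List Int).Perm [b, c, d]) ∨
    (w = b ∧ ([x, y, z] : List Int).Perm [a, c, d]) ∨
    (w = c ∧ ([x, y, z] : List Int).Perm [a, b, d]) ∨
    (w = d ∧ ([x, y, z] : List Int).Perm [a, b, c]) := by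
  have hw : w ∈ [a, b, c, d] := h.mem_iff.mp (List.mem_cons_self ..)
  rcases List.mem_cons.mp hw with rfl | hw'
  · exact Or.inl ⟨rfl, h.cons_inv⟩
  rcases List.mem_cons.mp hw' with rfl | hw''
  · exact Or.inr (Or.inl ⟨rfl, (h.trans (List.Perm.swap _ _ _)).cons_inv⟩)
  rcases List.mem_cons.mp hw'' with rfl | hw'''
  · have hc : ([a, b, w, d] : List Int).Perm [w, a, b, d] :=
      ((List.Perm.swap _ _ _).trans (List.Perm.cons a (List.Perm.swap _ _ _))).symm
    exact Or.inr (Or.inr (Or.inl ⟨rfl, (h.trans hc).cons_inv⟩))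
  · have hwd : w = d := by simpa using hw'''
    subst hwd
    have hc : ([a, b, c, w] : List Int).Perm [w, a, b, c] :=
      (((List.Perm.swap _ _ _).trans
        (List.Perm.cons a (List.Perm.swap _ _ _))).trans
        (List.Perm.cons a (List.Perm.cons b (List.Perm.swap _ _ _)))).symm
    exact Or.inr (Or.inr (Or.inr ⟨rfl, (h.trans hc).cons_inv⟩))

theorem perm_mem_LB {a b c d w x y z : Int} (h : ([w, x, y, z] : List Int).Perm [a, b, c, d]) :
    (w, x, y, z) ∈ mvtLB a b c d := by
  rcases perm4_cases h with ⟨rfl, h3⟩ | ⟨rfl, h3⟩ | ⟨rfl, h3⟩ | ⟨rfl, h3⟩ <;>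
  rcases perm3_cases h3 with ⟨rfl, h2⟩ | ⟨rfl, h2⟩ | ⟨rfl, h2⟩ <;>
  rcases perm2_cases h2 with ⟨rfl, rfl⟩ | ⟨rfl, rfl⟩ <;>
  simp [mvtLB]

-- ---- B's result characterized against all permutations ----
theorem B_none {a b c d : Int}
    (hno : ∀ w x y z : Int, ([w, x, y, z] : List Int).Perm [a, b, c, d] →
      ¬ mvtbValid w x y z = true) :
    (mvtLB a b c d).foldl bstep none = none :=
  foldl_bstep_none.mpr ⟨rfl, fun t ht => hno t.1 t.2.1 t.2.2.1 t.2.2.2 (mem_LB_perm ht)⟩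

theorem B_eq_of_max {a b c d : Int} {T : Int × Int × Int × Int}
    (hperm : ([T.1, T.2.1, T.2.2.1, T.2.2.2] : List Int).Perm [a, b, c, d])
    (hvalid : mvtbValid T.1 T.2.1 T.2.2.1 T.2.2.2 = true)
    (hdom : ∀ w x y z : Int, ([w, x, y, z] : List Int).Perm [a, b, c, d] →
      mvtbValid w x y z = true → mvtbGt (w, x, y, z) T = false) :
    (mvtLB a b c d).foldl bstep none = some T := by
  rcases hres : (mvtLB a b c d).foldl bstep none with _ | r
  · exfalso
    obtain ⟨-, hall⟩ := foldl_bstep_none.mp hres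
    exact hall T (perm_mem_LB hperm) hvalid
  · obtain ⟨h1, h2, -⟩ := foldl_bstep_some hres
    rcases h1 with h1 | ⟨hrv, hrLB⟩
    · cases h1
    · have hrperm := mem_LB_perm hrLB
      have d1 : mvtbGt T r = false := h2 T (perm_mem_LB hperm) hvalid
      have d2 : mvtbGt r T = false := hdom r.1 r.2.1 r.2.2.1 r.2.2.2 hrperm hrv
      rw [mvtbGt_antisymm d2 d1]

-- ---- shape of a 3-element list ----
theorem shape3 {t : List Int} (h : t.length = 3) : ∃ p q r, t = [p, q, r] := by
  rcases t with _ | ⟨p, t⟩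
  · simp at h
  rcases t with _ | ⟨q, t⟩
  · simp at h
  rcases t with _ | ⟨r, t⟩
  · simp at h
  rcases t with _ | ⟨s, t⟩
  · exact ⟨p, q, r, rfl⟩
  · simp at h

-- ---- selection facts for 3-element pick lists ----
theorem selok3 {p q r x y z : Int} (h : SelOk [p, q, r] [x, y, z]) :
    p ≤ x ∧ q ≤ y ∧ r ≤ z := by
  cases h with
  | cons h1 h2 =>
    cases h2 with
    | cons h3 h4 =>
      cases h4 with
      | cons h5 _ => exact ⟨h1, h3, h5⟩

theorem selok3_mk {p q r x y z : Int} (h1 : p ≤ x) (h2 : q ≤ y) (h3 : r ≤ z) :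
    SelOk [p, q, r] [x, y, z] :=
  List.Forall₂.cons h1 (List.Forall₂.cons h2 (List.Forall₂.cons h3 List.Forall₂.nil))

-- ---- main equivalence ----
theorem mvt_main (a b c d : Int) : max_valid_time a b c d = max_valid_time_alt a b c d := by
  rw [max_valid_time, max_valid_time_alt, mvtbLoop_eq]
  rcases hmax1 : PySem.List.max? (([a, b, c, d] : List Int).filter
      (fun x => decide (x ≤ (2:Int)))) (fun x => x) with _ | m1
  · -- no digit is ≤ 2: both attempts fail, no arrangement is valid
    rw [top1_none hmax1]
    have hno2 := maxf_none hmax1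
    rcases hmax2 : PySem.List.max? (([a, b, c, d] : List Int).filter
        (fun x => decide (x ≤ (1:Int)))) (fun x => x) with _ | n1
    · have hB : (mvtLB a b c d).foldl bstep none = none := by
        apply B_none
        intro w x y z hperm hv
        rw [mvtbValid_iff] at hv
        have hwmem : w ∈ ([a, b, c, d] : List Int) := hperm.mem_iff.mp (List.mem_cons_self ..)
        have := hno2 w hwmem
        simp at this
        omega
      rw [top2_none hmax2, hB]
    · exfalso
      obtain ⟨hn1mem, hn1p, -⟩ := maxf_some hmax2
      have := hno2 n1 hn1mem
      simp at this hn1p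
      omega
  · -- the greedy first pick m1 = max of the digits ≤ 2
    obtain ⟨hm1mem, hm1p, hm1max⟩ := maxf_some hmax1
    have hm1le : m1 ≤ 2 := by simpa using hm1p
    have hm1max' : ∀ x ∈ ([a, b, c, d] : List Int), x ≤ 2 → x ≤ m1 :=
      fun x hx h2 => hm1max x hx (by simpa using h2)
    rw [top1_some hmax1]
    rcases hgre1 : gre [if m1 ≤ 1 then 9 else 3, 5, 9] (([a, b, c, d] : List Int).erase m1)
      with _ | t3
    · -- the first try-block fails after picking m1
      simp only [Option.map_none]
      -- consequently every valid arrangement starts with a digit ≤ 1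
      have hwle1 : ∀ w x y z : Int, ([w, x, y, z] : List Int).Perm [a, b, c, d] →
          mvtbValid w x y z = true → w ≤ 1 := by
        intro w x y z hperm hv
        by_contra hw1
        rw [mvtbValid_iff] at hv
        obtain ⟨hw2, hx, hy, hz⟩ := hv
        have hx3 : x ≤ 3 := by tauto
        have hwmem : w ∈ ([a, b, c, d] : List Int) := hperm.mem_iff.mp (List.mem_cons_self ..)
        have hwm1 : w ≤ m1 := hm1max' w hwmem hw2
        have hweq : w = m1 := by omega
        have htail : ([x, y, z] : List Int).Perm (([a, b, c, d] : List Int).erase w) :=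
          (hperm.trans (List.perm_cons_erase hwmem)).cons_inv
        rw [hweq] at htail
        have hok : SelOk [x, y, z] [if m1 ≤ 1 then 9 else 3, 5, 9] := by
          rw [if_neg (by omega : ¬ m1 ≤ 1)]
          exact selok3_mk hx3 hy hz
        exact gre_none hgre1 [x, y, z] htail hok
      rcases hmax2 : PySem.List.max? (([a, b, c, d] : List Int).filter
          (fun x => decide (x ≤ (1:Int)))) (fun x => x) with _ | n1
      · -- fallback also fails at its first pick: nothing is ≤ 1
        have hB : (mvtLB a b c d).foldl bstep none = none := by
          apply B_none
          intro w x y z hperm hv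
          have hw1 : w ≤ 1 := hwle1 w x y z hperm hv
          have hwmem : w ∈ ([a, b, c, d] : List Int) := hperm.mem_iff.mp (List.mem_cons_self ..)
          have := maxf_none hmax2 w hwmem
          simp at this
          omega
        rw [top2_none hmax2, hB]
      · -- fallback picks n1 = max of the digits ≤ 1
        obtain ⟨hn1mem, hn1p, hn1max⟩ := maxf_some hmax2
        have hn1le : n1 ≤ 1 := by simpa using hn1p
        have hn1max' : ∀ x ∈ ([a, b, c, d] : List Int), x ≤ 1 → x ≤ n1 :=
          fun x hx h1 => hn1max x hx (by simpa using h1)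
        rw [top2_some hmax2]
        rcases hgre2 : gre [9, 5, 9] (([a, b, c, d] : List Int).erase n1) with _ | u3
        · -- fallback fails too: no valid arrangement at all
          simp only [Option.map_none]
          have hB : (mvtLB a b c d).foldl bstep none = none := by
            apply B_none
            intro w x y z hperm hv
            have hw1 : w ≤ 1 := hwle1 w x y z hperm hv
            rw [mvtbValid_iff] at hv
            obtain ⟨hw2, hx, hy, hz⟩ := hv
            have hx9 : x ≤ 9 := by tauto
            have hwmem : w ∈ ([a, b, c, d] : List Int) := hperm.mem_iff.mp (List.mem_cons_self ..)
            have hwn1 : w ≤ n1 := hn1max' w hwmem hw1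
            obtain ⟨rest', hp', hok'⟩ := exch hperm (selok3_mk hx9 hy hz) hn1mem hwn1
            exact gre_none hgre2 rest' hp' hok'
          rw [hB]
        · -- fallback succeeds: its output is the lexicographic maximum
          have hlen : ((([a, b, c, d] : List Int)).erase n1).length = 3 := by
            rw [List.length_erase_of_mem hn1mem]; rfl
          obtain ⟨hu3perm, hu3ok⟩ := gre_some hgre2 (by rw [hlen]; rfl)
          obtain ⟨n2, n3, n4, rfl⟩ := shape3 (by rw [hu3perm.length_eq, hlen])
          obtain ⟨hn2, hn3, hn4⟩ := selok3 hu3ok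
          simp only [Option.map_some]
          have hTperm : ([n1, n2, n3, n4] : List Int).Perm [a, b, c, d] :=
            (List.Perm.cons n1 hu3perm).trans (List.perm_cons_erase hn1mem).symm
          have hTvalid : mvtbValid n1 n2 n3 n4 = true := by
            rw [mvtbValid_iff]
            exact ⟨by omega, Or.inl ⟨hn1le, hn2⟩, hn3, hn4⟩
          have hB : (mvtLB a b c d).foldl bstep none = some (n1, n2, n3, n4) := by
            apply B_eq_of_max hTperm hTvalid
            intro w x y z hperm hv
            have hw1 : w ≤ 1 := hwle1 w x y z hperm hv
            rw [mvtbValid_iff] at hv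
            obtain ⟨hw2, hx, hy, hz⟩ := hv
            have hx9 : x ≤ 9 := by tauto
            have hwmem : w ∈ ([a, b, c, d] : List Int) := hperm.mem_iff.mp (List.mem_cons_self ..)
            have hwn1 : w ≤ n1 := hn1max' w hwmem hw1
            rcases eq_or_lt_of_le hwn1 with hweq | hwlt
            · have htail : ([x, y, z] : List Int).Perm (([a, b, c, d] : List Int).erase w) :=
                (hperm.trans (List.perm_cons_erase hwmem)).cons_inv
              rw [hweq] at htail
              have hlex := gre_dom hgre2 [x, y, z] htail (selok3_mk hx9 hy hz)
              simp only [lexLeL] at hlex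
              rw [mvtbGt_false_iff]
              dsimp only
              omega
            · rw [mvtbGt_false_iff]
              dsimp only
              omega
          rw [hB]
          rfl
    · -- the first try-block succeeds: its output is the lexicographic maximum
      have hlen : ((([a, b, c, d] : List Int)).erase m1).length = 3 := by
        rw [List.length_erase_of_mem hm1mem]; rfl
      obtain ⟨ht3perm, ht3ok⟩ := gre_some hgre1 (by rw [hlen]; rfl)
      obtain ⟨m2, m3, m4, rfl⟩ := shape3 (by rw [ht3perm.length_eq, hlen])
      simp only [Option.map_some]
      have hTperm : ([m1, m2, m3, m4] : List Int).Perm [a, b, c, d] :=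
        (List.Perm.cons m1 ht3perm).trans (List.perm_cons_erase hm1mem).symm
      have hTvalid : mvtbValid m1 m2 m3 m4 = true := by
        rw [mvtbValid_iff]
        by_cases hm11 : m1 ≤ 1
        · rw [if_pos hm11] at ht3ok
          obtain ⟨hm2, hm3, hm4⟩ := selok3 ht3ok
          exact ⟨hm1le, Or.inl ⟨hm11, hm2⟩, hm3, hm4⟩
        · rw [if_neg hm11] at ht3ok
          obtain ⟨hm2, hm3, hm4⟩ := selok3 ht3ok
          exact ⟨hm1le, Or.inr ⟨hm11, hm2⟩, hm3, hm4⟩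
      have hB : (mvtLB a b c d).foldl bstep none = some (m1, m2, m3, m4) := by
        apply B_eq_of_max hTperm hTvalid
        intro w x y z hperm hv
        rw [mvtbValid_iff] at hv
        obtain ⟨hw2, hx, hy, hz⟩ := hv
        have hwmem : w ∈ ([a, b, c, d] : List Int) := hperm.mem_iff.mp (List.mem_cons_self ..)
        have hwm1 : w ≤ m1 := hm1max' w hwmem hw2
        rcases eq_or_lt_of_le hwm1 with hweq | hwlt
        · have htail : ([x, y, z] : List Int).Perm (([a, b, c, d] : List Int).erase w) :=
            (hperm.trans (List.perm_cons_erase hwmem)).cons_inv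
          rw [hweq] at htail
          have hok : SelOk [x, y, z] [if m1 ≤ 1 then 9 else 3, 5, 9] := by
            by_cases hm11 : m1 ≤ 1
            · rw [if_pos hm11]
              have hx9 : x ≤ 9 := by subst hweq; tauto
              exact selok3_mk hx9 hy hz
            · rw [if_neg hm11]
              have hx3 : x ≤ 3 := by subst hweq; tauto
              exact selok3_mk hx3 hy hz
          have hlex := gre_dom hgre1 [x, y, z] htail hok
          simp only [lexLeL] at hlex
          rw [mvtbGt_false_iff]
          dsimp only
          omega
        · rw [mvtbGt_false_iff]
          dsimp only
          omega
      rw [hB]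
      rfl

-- ===== VERDICT (by name: the statement is the Claim_ definition above) =====
theorem max_valid_time_spec : Claim_equal_max_valid_time := by
  intro A B C D _
  exact mvt_main A B C D
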